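-- pv_equiv track=rewrite | github.com/2sh/num-radix | radix.py | _get_scale_from_format
-- ===== SOURCE A (Python) =====
-- import string
--
-- def _get_scale_from_format(fmt):
-- 	scale = ""
-- 	try:
-- 		for char in fmt[fmt.index(".")+1:]:
-- 			if char not in string.digits:
-- 				break
-- 			scale += char
-- 		return int(scale)
-- 	except:
-- 		return None
-- ===== SOURCE B (Python) =====
-- import string
--
-- def _get_scale_from_format(fmt):
-- 	tail = fmt.partition(".")[2]
-- 	digits = tail[:len(tail) - len(tail.lstrip(string.digits))]
-- 	return int(digits) if digits else None
-- ===== Notes on version B (the rewrite author's own statement) =====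
-- stated objective: simpler
-- what changed: Replaced the index/slice plus character-by-character scan-and-accumulate loop inside a try/except with a loop-free pipeline: partition at the first dot, lstrip the digits, and take the length difference as the digit run; the empty-digits/no-dot cases fall out of the final conditional instead of exceptions.
import Mathlib
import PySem

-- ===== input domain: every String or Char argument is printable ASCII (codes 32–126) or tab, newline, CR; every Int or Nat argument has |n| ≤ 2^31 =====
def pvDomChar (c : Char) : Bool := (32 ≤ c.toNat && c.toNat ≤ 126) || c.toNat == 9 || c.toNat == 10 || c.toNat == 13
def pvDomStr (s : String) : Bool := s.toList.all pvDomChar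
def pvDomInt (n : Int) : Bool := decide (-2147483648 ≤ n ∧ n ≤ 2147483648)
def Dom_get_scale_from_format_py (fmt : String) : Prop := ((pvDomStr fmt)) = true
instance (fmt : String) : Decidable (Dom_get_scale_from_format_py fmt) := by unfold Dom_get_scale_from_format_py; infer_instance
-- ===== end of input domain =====

-- B replaces A's index/slice/scan-and-accumulate loop inside try/except by a loop-free
-- partition + lstrip length arithmetic (objective: simpler).

-- ===== PORT A =====
-- string.digits
def pvStringDigits : List Char := "0123456789".toList

-- the for-loop: scale = ""; for char in tail: if char not in string.digits: break; scale += char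
def pvScaleLoop (cs : List Char) (scale : List Char) : List Char :=
  match cs with
  | [] => scale
  | c :: rest => if c ∉ pvStringDigits then scale else pvScaleLoop rest (scale ++ [c])

def get_scale_from_format_py (fmt : String) : Option Int :=
  let i := PySem.Chars.find fmt.toList ['.']
  -- fmt.index(".") raises ValueError when there is no "."; the broad except returns None
  if i = -1 then none
  else
    -- int(scale): ValueError (scale = "") → except → None
    PySem.Int.ofChars? (pvScaleLoop (PySem.List.slice fmt.toList (some (i + 1)) none) [])

-- ===== PORT B =====
def get_scale_from_format_py_alt (fmt : String) : Option Int :=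
  let tail := (fmt.toList.dropWhile (· != '.')).drop 1            -- fmt.partition(".")[2]
  let stripped := tail.dropWhile (fun c => decide (c ∈ pvStringDigits))  -- tail.lstrip(string.digits)
  let digits := tail.take (tail.length - stripped.length)          -- tail[:len(tail)-len(...)]
  if digits.isEmpty then none else PySem.Int.ofChars? digits

-- ===== PRECONDITION & SPEC =====
def Spec_get_scale_from_format_py (fmt : String) (out : Option Int) : Prop := out = get_scale_from_format_py_alt fmt
instance (fmt : String) (out : Option Int) : Decidable (Spec_get_scale_from_format_py fmt out) := by unfold Spec_get_scale_from_format_py; infer_instance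

-- ===== CLAIM (what is proved, stated in full; the proofs are below) =====
def Claim_equal_get_scale_from_format_py : Prop := ∀ (fmt : String), Dom_get_scale_from_format_py fmt → Spec_get_scale_from_format_py fmt (get_scale_from_format_py fmt)

-- ===== LEMMAS AND PROOFS =====

-- A's loop accumulates exactly the leading digit run
lemma pvScaleLoop_eq (cs acc : List Char) :
    pvScaleLoop cs acc = acc ++ cs.takeWhile (fun c => decide (c ∈ pvStringDigits)) := by
  induction cs generalizing acc with
  | nil => simp [pvScaleLoop]
  | cons c rest ih =>
    by_cases h : c ∈ pvStringDigits
    · simp [pvScaleLoop, h, ih]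
    · simp [pvScaleLoop, h]

-- B's take-by-length-difference is takeWhile
lemma pv_take_sub_dropWhile (p : Char → Bool) (l : List Char) :
    l.take (l.length - (l.dropWhile p).length) = l.takeWhile p := by
  have hlen : (l.takeWhile p).length + (l.dropWhile p).length = l.length := by
    have h := congrArg List.length (List.takeWhile_append_dropWhile (p := p) (l := l))
    rw [List.length_append] at h
    exact h
  have : l.length - (l.dropWhile p).length = (l.takeWhile p).length := by omega
  rw [this]
  have hpre : l.takeWhile p <+: l := List.takeWhile_prefix p
  exact (List.prefix_iff_eq_take.mp hpre).symm

-- no '.' in l → dropWhile (· != '.') drops everything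
lemma pv_dropWhile_of_not_mem (l : List Char) (h : '.' ∉ l) :
    l.dropWhile (· != '.') = [] := by
  induction l with
  | nil => rfl
  | cons c rest ih =>
    have hc : (c != '.') = true := by
      simp only [bne_iff_ne, ne_eq]
      intro e; exact h (e ▸ List.mem_cons_self)
    have := ih (fun hm => h (List.mem_cons_of_mem _ hm))
    simp [List.dropWhile, hc, this]

-- the first '.' is at n → dropWhile (· != '.') = drop n
lemma pv_dropWhile_eq_drop (l : List Char) (n : Nat)
    (hc : l[n]? = some '.') (hmin : ∀ i, i < n → l[i]? ≠ some '.') :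
    l.dropWhile (· != '.') = l.drop n := by
  induction l generalizing n with
  | nil => simp at hc
  | cons c rest ih =>
    cases n with
    | zero =>
      simp at hc
      simp [List.dropWhile, hc]
    | succ m =>
      have hne : (c != '.') = true := by
        have := hmin 0 (Nat.succ_pos m)
        simpa using this
      have hc' : rest[m]? = some '.' := by simpa using hc
      have hmin' : ∀ i, i < m → rest[i]? ≠ some '.' := by
        intro i hi
        have := hmin (i + 1) (by omega)
        simpa using this
      simp [List.dropWhile, hne, ih m hc' hmin']

lemma pv_ofChars_nil : PySem.Int.ofChars? ([] : List Char) = none := by decide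

-- main equivalence
lemma pv_main (fmt : String) :
    get_scale_from_format_py fmt = get_scale_from_format_py_alt fmt := by
  unfold get_scale_from_format_py get_scale_from_format_py_alt
  generalize fmt.toList = l
  by_cases hfind : PySem.Chars.find l ['.'] = -1
  · -- no dot: A returns none; B's tail is []
    have hnot : '.' ∉ l := by
      have hninf := (PySem.Chars.find_eq_neg_one_iff (s := l) (sub := ['.'])).mp hfind
      intro hm
      obtain ⟨s, t, hst⟩ := List.mem_iff_append.mp hm
      exact hninf ⟨s, t, by rw [hst]; simp⟩
    rw [pv_dropWhile_of_not_mem l hnot]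
    simp [hfind]
  · -- dot present at index n = find.toNat
    have hspec := PySem.Chars.findFrom_natCast_spec l ['.'] 0 (Nat.zero_le _)
      (by simpa using hfind)
    simp only [Nat.cast_zero, PySem.Chars.findFrom_zero] at hspec
    obtain ⟨hge, hpre, hmin⟩ := hspec
    set n := (PySem.Chars.find l ['.']).toNat with hn
    have hfn : PySem.Chars.find l ['.'] = (n : Int) := by omega
    have hcn : l[n]? = some '.' := by
      obtain ⟨t, ht⟩ := hpre
      have hdr : (l.drop n)[0]? = some '.' := by rw [← ht]; rfl
      rw [List.getElem?_drop] at hdr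
      simpa using hdr
    have hminn : ∀ i, i < n → l[i]? ≠ some '.' := by
      intro i hi he
      apply hmin i (Nat.zero_le _) (by omega)
      obtain ⟨h1, h2⟩ := List.getElem?_eq_some_iff.mp he
      have hdr : l.drop i = '.' :: l.drop (i + 1) := by
        rw [List.drop_eq_getElem_cons h1, h2]
      rw [hdr]
      exact ⟨_, rfl⟩
    rw [pv_dropWhile_eq_drop l n hcn hminn]
    have hslice : PySem.List.slice l (some (PySem.Chars.find l ['.'] + 1)) none
        = l.drop (n + 1) := by
      rw [hfn]
      have hcast : ((n : Int) + 1) = ((n + 1 : Nat) : Int) := by push_cast; ring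
      rw [hcast, PySem.List.slice_from_natCast]
    rw [if_neg hfind, hslice, List.drop_drop]
    rw [pvScaleLoop_eq]
    simp only [List.nil_append, pv_take_sub_dropWhile]
    cases he : (l.drop (n + 1)).takeWhile (fun c => decide (c ∈ pvStringDigits)) with
    | nil => simp [pv_ofChars_nil]
    | cons a t => simp

-- ===== VERDICT (by name: the statement is the Claim_ definition above) =====
theorem get_scale_from_format_py_spec : Claim_equal_get_scale_from_format_py := by
  intro fmt _
  unfold Spec_get_scale_from_format_py
  exact pv_main fmt
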